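-- pv_equiv track=rewrite | github.com/ascoderu/compression-benchmarks | benchmarks/encryption.py | _return_chunks
-- ===== SOURCE A (Python) =====
-- from itertools import tee
--
-- def _return_chunks(data, minsize=48):
--
--     cur, ahead = tee(data)
--     ahead_val = next(ahead, None)
--
--     while ahead_val is not None:
--
--         bytes = next(cur, None)
--         ahead_val = next(ahead, None)
--
--         while (len(bytes) < minsize) and ahead_val is not None:
--             bytes += next(cur, None)
--             ahead_val = next(ahead, None)
--
--         if ahead_val is None:
--             yield (bytes, None)
--         else:
--             yield (bytes, True)
-- ===== SOURCE B (Python) =====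
-- def _return_chunks(data, minsize=48):
--     # Phase 1: build all chunks greedily (a chunk is closed once it has
--     # reached minsize characters); phase 2: emit them with the more-flag.
--     chunks = []
--     cur = None
--     for item in data:
--         if cur is not None and len(cur) >= minsize:
--             chunks.append(cur)
--             cur = item
--         elif cur is None:
--             cur = item
--         else:
--             cur += item
--     if cur is not None:
--         chunks.append(cur)
--     for i, chunk in enumerate(chunks):
--         yield (chunk, True if i + 1 < len(chunks) else None)
-- ===== Notes on version B (the rewrite author's own statement) =====
-- stated objective: simpler
-- what changed: Replaced the tee-based one-item lookahead interleaved with yields by a two-phase structure: one pass greedily builds the list of chunks, a second pass emits each with True and the last with None.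
import Mathlib
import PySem

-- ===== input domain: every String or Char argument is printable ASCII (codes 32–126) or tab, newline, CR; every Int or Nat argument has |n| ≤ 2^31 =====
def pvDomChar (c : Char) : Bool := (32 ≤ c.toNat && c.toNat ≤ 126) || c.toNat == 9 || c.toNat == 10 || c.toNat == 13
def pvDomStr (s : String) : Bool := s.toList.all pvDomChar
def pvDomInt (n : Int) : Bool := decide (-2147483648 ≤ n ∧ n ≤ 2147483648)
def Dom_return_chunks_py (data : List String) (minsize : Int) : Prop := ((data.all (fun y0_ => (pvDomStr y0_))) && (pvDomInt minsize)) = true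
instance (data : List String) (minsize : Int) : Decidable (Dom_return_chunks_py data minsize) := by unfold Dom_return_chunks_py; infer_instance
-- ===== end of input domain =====

-- B changes: two-phase build-then-emit instead of A's tee lookahead interleaved with yields (objective: simpler).

-- ===== PORT A =====
-- A's inner while: bytes grows while shorter than minsize and lookahead is not exhausted.
-- State (cur, ahead, aheadVal) models the two tee'd iterators: cur the lagging one,
-- aheadVal = next(ahead, None) already taken, ahead the items still behind it.
def pvInnerA (minsize : Int) (bytes : String) (cur ahead : List String)
    (aheadVal : Option String) : String × List String × List String × Option String :=
  if ((bytes.length : Int)) < minsize ∧ aheadVal.isSome then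
    match cur with
    | [] => (bytes, [], ahead, aheadVal)  -- unreachable: Python would raise (bytes += None)
    | b :: cur' => pvInnerA minsize (bytes ++ b) cur' (ahead.drop 1) ahead.head?
  else (bytes, cur, ahead, aheadVal)

theorem pvInnerA_len (minsize : Int) (bytes : String) (cur ahead : List String)
    (aheadVal : Option String) :
    (pvInnerA minsize bytes cur ahead aheadVal).2.1.length ≤ cur.length := by
  induction cur generalizing bytes ahead aheadVal with
  | nil => unfold pvInnerA; split <;> simp
  | cons b cur' ih =>
    unfold pvInnerA
    split
    · exact le_trans (ih _ _ _) (by simp)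
    · simp

-- A's outer while loop.
def pvOuterA (minsize : Int) (cur ahead : List String) (aheadVal : Option String) :
    List (String × Option Bool) :=
  match aheadVal with
  | none => []
  | some _ =>
    match cur with
    | [] => []  -- unreachable: Python would raise (len(None))
    | b :: cur' =>
      let s := pvInnerA minsize b cur' (ahead.drop 1) ahead.head?
      match s.2.2.2 with
      | none => (s.1, none) :: pvOuterA minsize s.2.1 s.2.2.1 none
      | some _ => (s.1, some true) :: pvOuterA minsize s.2.1 s.2.2.1 s.2.2.2
  termination_by cur.length
  decreasing_by
    all_goals
      simp only [List.length_cons]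
      exact Nat.lt_succ_of_le (pvInnerA_len ..)

def return_chunks_py (data : List String) (minsize : Int) : List (String × Option Bool) :=
  pvOuterA minsize data (data.drop 1) data.head?

-- ===== PORT B =====
-- Phase 1 of Source B: the for-loop over data with state (chunks, cur), plus the final flush.
def pvBuildB (minsize : Int) : List String → List String → Option String → List String
  | [], chunks, cur =>
    match cur with
    | none => chunks
    | some c => chunks ++ [c]
  | item :: rest, chunks, cur =>
    match cur with
    | some c =>
      if minsize ≤ ((c.length : Int)) then pvBuildB minsize rest (chunks ++ [c]) (some item)
      else pvBuildB minsize rest chunks (some (c ++ item))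
    | none => pvBuildB minsize rest chunks (some item)

-- Phase 2 of Source B: emit (chunk, True) for all but the last, (last, None).
def pvEmitB : List String → List (String × Option Bool)
  | [] => []
  | [c] => [(c, none)]
  | c :: rest => (c, some true) :: pvEmitB rest

def return_chunks_py_alt (data : List String) (minsize : Int) : List (String × Option Bool) :=
  pvEmitB (pvBuildB minsize data [] none)

-- ===== PRECONDITION & SPEC =====
def Spec_return_chunks_py (data : List String) (minsize : Int) (out : List (String × Option Bool)) : Prop := out = return_chunks_py_alt data minsize
instance (data : List String) (minsize : Int) (out : List (String × Option Bool)) : Decidable (Spec_return_chunks_py data minsize out) := by unfold Spec_return_chunks_py; infer_instance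

-- ===== CLAIM (what is proved, stated in full; the proofs are below) =====
def Claim_equal_return_chunks_py : Prop := ∀ (data : List String) (minsize : Int), Dom_return_chunks_py data minsize → Spec_return_chunks_py data minsize (return_chunks_py data minsize)

-- ===== LEMMAS AND PROOFS =====

-- Reference greedy splitter: grab absorbs items into b while b is shorter than minsize.
def pvGrab (minsize : Int) (b : String) : List String → String × List String
  | [] => (b, [])
  | y :: ys =>
    if ((b.length : Int)) < minsize then pvGrab minsize (b ++ y) ys
    else (b, y :: ys)

theorem pvGrab_len (minsize : Int) (b : String) (xs : List String) :
    (pvGrab minsize b xs).2.length ≤ xs.length := by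
  induction xs generalizing b with
  | nil => simp [pvGrab]
  | cons y ys ih =>
    unfold pvGrab
    split
    · exact le_trans (ih _) (by simp)
    · simp

def pvChunks (minsize : Int) : List String → List String
  | [] => []
  | x :: xs =>
    (pvGrab minsize x xs).1 :: pvChunks minsize (pvGrab minsize x xs).2
  termination_by l => l.length
  decreasing_by exact Nat.lt_succ_of_le (pvGrab_len ..)

-- A's inner loop computes pvGrab (under the tee invariant ahead = cur.tail, aheadVal = cur.head?).
theorem pvInnerA_eq (minsize : Int) (b : String) (cur : List String) :
    pvInnerA minsize b cur cur.tail cur.head?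
      = ((pvGrab minsize b cur).1, (pvGrab minsize b cur).2,
         (pvGrab minsize b cur).2.tail, (pvGrab minsize b cur).2.head?) := by
  induction cur generalizing b with
  | nil =>
    unfold pvInnerA pvGrab; split <;> simp_all
  | cons y ys ih =>
    unfold pvInnerA pvGrab
    by_cases h : ((b.length : Int)) < minsize
    · simp only [h, List.head?_cons, Option.isSome_some, and_true, if_true, List.drop_one,
        List.tail_cons]
      exact ih (b ++ y)
    · simp [h]

theorem pvChunks_ne_nil (minsize : Int) (x : String) (xs : List String) :
    pvChunks minsize (x :: xs) ≠ [] := by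
  unfold pvChunks; simp

theorem pvEmitB_cons (c : String) (l : List String) (h : l ≠ []) :
    pvEmitB (c :: l) = (c, some true) :: pvEmitB l := by
  cases l with
  | nil => exact absurd rfl h
  | cons a as => rfl

-- A's outer loop equals emit ∘ chunks.
theorem pvOuterA_eq (minsize : Int) (cur : List String) :
    pvOuterA minsize cur (cur.drop 1) cur.head? = pvEmitB (pvChunks minsize cur) := by
  induction hn : cur.length using Nat.strong_induction_on generalizing cur with
  | _ n ih =>
    cases cur with
    | nil => simp [pvOuterA, pvChunks, pvEmitB]
    | cons b cur' =>
      unfold pvOuterA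
      simp only [List.head?_cons, List.drop_one, List.tail_cons]
      rw [pvInnerA_eq]
      have hlen : (pvGrab minsize b cur').2.length < n := by
        subst hn; exact Nat.lt_succ_of_le (pvGrab_len ..)
      cases hr : (pvGrab minsize b cur').2 with
      | nil =>
        simp only [List.head?_nil, List.tail_nil]
        unfold pvOuterA
        conv_rhs => rw [pvChunks]
        rw [hr, pvChunks]
        rfl
      | cons r rs =>
        simp only [List.head?_cons, List.tail_cons]
        conv_rhs => rw [pvChunks]
        rw [hr, pvEmitB_cons _ _ (pvChunks_ne_nil _ _ _)]
        have := ih (r :: rs).length (by rw [← hr]; exact hlen) (r :: rs) rfl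
        simp only [List.drop_one, List.tail_cons, List.head?_cons] at this
        rw [this]

-- B's open-chunk continuation: chunks still to come given open chunk c and remaining data.
def pvF (minsize : Int) (c : String) : List String → List String
  | [] => [c]
  | y :: ys =>
    if minsize ≤ ((c.length : Int)) then c :: pvF minsize y ys
    else pvF minsize (c ++ y) ys

theorem pvF_eq (minsize : Int) (c : String) (data : List String) :
    pvF minsize c data = (pvGrab minsize c data).1 :: pvChunks minsize (pvGrab minsize c data).2 := by
  induction data generalizing c with
  | nil => simp [pvF, pvGrab, pvChunks]
  | cons y ys ih =>
    unfold pvF pvGrab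
    by_cases h : ((c.length : Int)) < minsize
    · simp only [if_neg (not_le.mpr h), if_pos h]
      exact ih (c ++ y)
    · simp only [if_pos (not_lt.mp h), if_neg h]
      conv_rhs => rw [pvChunks]
      rw [ih y]

theorem pvBuildB_eq (minsize : Int) (data : List String) :
    ∀ (chunks : List String) (cur : Option String),
      pvBuildB minsize data chunks cur
        = chunks ++ (match cur with
                     | none => pvChunks minsize data
                     | some c => pvF minsize c data) := by
  induction data with
  | nil =>
    intro chunks cur
    cases cur <;> simp [pvBuildB, pvChunks, pvF]
  | cons item rest ih =>
    intro chunks cur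
    cases cur with
    | none =>
      have := ih chunks (some item)
      simp only [pvBuildB, this]
      have : pvChunks minsize (item :: rest) = pvF minsize item rest := by
        rw [pvF_eq]; conv_lhs => rw [pvChunks]
      rw [this]
    | some c =>
      simp only [pvBuildB, pvF]
      by_cases h : minsize ≤ ((c.length : Int))
      · simp only [if_pos h, ih (chunks ++ [c]) (some item), List.append_assoc]
        rfl
      · simp only [if_neg h, ih chunks (some (c ++ item))]

theorem return_chunks_eq (data : List String) (minsize : Int) :
    return_chunks_py data minsize = return_chunks_py_alt data minsize := by
  unfold return_chunks_py return_chunks_py_alt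
  rw [pvOuterA_eq, pvBuildB_eq]
  simp

-- ===== VERDICT (by name: the statement is the Claim_ definition above) =====
theorem return_chunks_py_spec : Claim_equal_return_chunks_py := by
  intro data minsize _
  unfold Spec_return_chunks_py
  exact return_chunks_eq data minsize
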